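-- pv_equiv track=rewrite | github.com/SoloCT/wispr | src/wispr_clone/hotkey_dialog.py | _format_combo
-- ===== SOURCE A (Python) =====
-- _MODIFIER_ORDER = ["ctrl", "alt", "shift", "windows", "cmd"]
--
-- def _format_combo(keys: list[str]) -> str:
--     """Order modifiers first, then the trigger key. Lowercase normalized."""
--     seen: set[str] = set()
--     mods: list[str] = []
--     others: list[str] = []
--     for k in keys:
--         name = k.lower().replace("left ", "").replace("right ", "")
--         if name in seen:
--             continue
--         seen.add(name)
--         if name in _MODIFIER_ORDER:
--             mods.append(name)
--         else:
--             others.append(name)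
--     mods.sort(key=lambda m: _MODIFIER_ORDER.index(m))
--     return "+".join(mods + others)
-- ===== SOURCE B (Python) =====
-- _MODIFIER_ORDER = ["ctrl", "alt", "shift", "windows", "cmd"]
--
-- def _format_combo(keys: list[str]) -> str:
--     """Order modifiers first, then the trigger key. Lowercase normalized."""
--     unique: list[str] = []
--     seen: set[str] = set()
--     for k in keys:
--         name = k.lower().replace("left ", "").replace("right ", "")
--         if name not in seen:
--             seen.add(name)
--             unique.append(name)
--     mods = [m for m in _MODIFIER_ORDER if m in seen]
--     others = [n for n in unique if n not in _MODIFIER_ORDER]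
--     return "+".join(mods + others)
-- ===== Notes on version B (the rewrite author's own statement) =====
-- stated objective: idiomatic
-- what changed: B builds one ordered list of unique normalized names in a single dedup pass, then obtains the modifiers by scanning the fixed _MODIFIER_ORDER list (which is already canonically ordered) instead of splitting into two lists and sorting the modifiers by list.index.
import Mathlib
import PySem

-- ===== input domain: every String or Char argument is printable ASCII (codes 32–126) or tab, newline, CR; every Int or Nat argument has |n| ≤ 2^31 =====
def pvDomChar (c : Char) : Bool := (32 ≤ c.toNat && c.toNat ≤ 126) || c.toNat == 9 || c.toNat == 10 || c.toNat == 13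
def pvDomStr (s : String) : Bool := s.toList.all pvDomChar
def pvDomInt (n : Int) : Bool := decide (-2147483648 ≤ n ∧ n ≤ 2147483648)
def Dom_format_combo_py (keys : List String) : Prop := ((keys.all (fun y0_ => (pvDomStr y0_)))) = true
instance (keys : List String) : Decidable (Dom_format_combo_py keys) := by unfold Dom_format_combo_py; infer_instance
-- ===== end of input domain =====

-- B replaces A's split-into-two-lists-then-sort-by-list.index with a single ordered dedup pass
-- followed by a scan of the fixed _MODIFIER_ORDER list (already in canonical order); idiomatic, same result.

-- ===== PORT A =====
-- module constant _MODIFIER_ORDER, shared by both ports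
def pvOrderList : List String := ["ctrl", "alt", "shift", "windows", "cmd"]
-- k.lower().replace("left ", "").replace("right ", "")  (shared normalization expression)
def pvNorm (k : String) : String :=
  PySem.Str.replace (PySem.Str.replace (PySem.Str.lower k) "left " "") "right " ""

-- loop body of A: state (seen, mods, others)
def pvStepA (st : PySem.Set String × List String × List String) (k : String) :
    PySem.Set String × List String × List String :=
  let name := pvNorm k
  if PySem.Set.contains st.1 name then st
  else if name ∈ pvOrderList then (PySem.Set.add st.1 name, st.2.1 ++ [name], st.2.2)
  else (PySem.Set.add st.1 name, st.2.1, st.2.2 ++ [name])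

-- mods.sort(key=lambda m: _MODIFIER_ORDER.index(m)): every element of mods is in _MODIFIER_ORDER,
-- so list.index never raises; ported as (index? …).getD 0 — exact on all reachable states.
def format_combo_py (keys : List String) : String :=
  let st := keys.foldl pvStepA (PySem.Set.empty, [], [])
  let mods := PySem.List.sorted st.2.1 (fun m => (PySem.List.index? pvOrderList m).getD 0) false
  PySem.Str.join "+" (mods ++ st.2.2)

-- ===== PORT B =====
-- loop body of B: state (unique, seen)
def pvStepB (st : List String × PySem.Set String) (k : String) : List String × PySem.Set String :=
  let name := pvNorm k
  if PySem.Set.contains st.2 name then st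
  else (st.1 ++ [name], PySem.Set.add st.2 name)

def format_combo_py_alt (keys : List String) : String :=
  let st := keys.foldl pvStepB ([], PySem.Set.empty)
  let mods := pvOrderList.filter (fun m => PySem.Set.contains st.2 m)
  let others := st.1.filter (fun n => !decide (n ∈ pvOrderList))
  PySem.Str.join "+" (mods ++ others)

-- ===== PRECONDITION & SPEC =====
def Spec_format_combo_py (keys : List String) (out : String) : Prop := out = format_combo_py_alt keys
instance (keys : List String) (out : String) : Decidable (Spec_format_combo_py keys out) := by unfold Spec_format_combo_py; infer_instance

-- ===== CLAIM (what is proved, stated in full; the proofs are below) =====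
def Claim_equal_format_combo_py : Prop := ∀ (keys : List String), Dom_format_combo_py keys → Spec_format_combo_py keys (format_combo_py keys)

-- ===== LEMMAS AND PROOFS =====

-- contains s x as a decide, for rewriting filters
theorem pv_contains_eq (s : PySem.Set String) (x : String) :
    PySem.Set.contains s x = decide (x ∈ s) := by
  by_cases h : x ∈ s <;> simp [h]

-- A's loop, from a state whose mods/others are the two filters of its seen-list,
-- ends in the same shape with seen grown by the new normalized names.
theorem pv_foldA (keys : List String) (u : PySem.Set String) :
    keys.foldl pvStepA
      (u, u.filter (fun x => decide (x ∈ pvOrderList)),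
          u.filter (fun x => !decide (x ∈ pvOrderList)))
    = ((keys.map pvNorm).foldl PySem.Set.add u,
       ((keys.map pvNorm).foldl PySem.Set.add u).filter (fun x => decide (x ∈ pvOrderList)),
       ((keys.map pvNorm).foldl PySem.Set.add u).filter (fun x => !decide (x ∈ pvOrderList))) := by
  induction keys generalizing u with
  | nil => rfl
  | cons k t ih =>
    simp only [List.foldl_cons, List.map_cons, pvStepA]
    by_cases h : pvNorm k ∈ u
    · simp only [pv_contains_eq, h, decide_true, PySem.Set.add]
      simpa [PySem.Set.add, pv_contains_eq, h] using ih u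
    · simp only [pv_contains_eq, h, decide_false, Bool.false_eq_true, if_false]
      by_cases hm : pvNorm k ∈ pvOrderList
      · simp only [hm]
        have := ih (u ++ [pvNorm k])
        simp only [List.filter_append, List.filter_cons, List.filter_nil, hm, decide_true,
          Bool.not_true] at this
        simpa [PySem.Set.add, pv_contains_eq, h, List.filter_append, hm] using this
      · simp only [hm]
        have := ih (u ++ [pvNorm k])
        simpa [PySem.Set.add, pv_contains_eq, h, List.filter_append, hm] using this
  
-- B's loop keeps its unique-list and its seen-set equal as lists.
theorem pv_foldB (keys : List String) (u : PySem.Set String) :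
    keys.foldl pvStepB (u, u)
    = ((keys.map pvNorm).foldl PySem.Set.add u,
       (keys.map pvNorm).foldl PySem.Set.add u) := by
  induction keys generalizing u with
  | nil => rfl
  | cons k t ih =>
    simp only [List.foldl_cons, List.map_cons, pvStepB]
    by_cases h : pvNorm k ∈ u
    · simpa [pv_contains_eq, h, PySem.Set.add] using ih u
    · simpa [pv_contains_eq, h, PySem.Set.add] using ih (u ++ [pvNorm k])

-- The index-keyed sort of the modifiers seen equals the order-list filtered by membership.
theorem pv_mods_sorted (u : List String) (hu : u.Nodup) :
    PySem.List.sorted (u.filter (fun x => decide (x ∈ pvOrderList)))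
      (fun m => (PySem.List.index? pvOrderList m).getD 0) false
    = pvOrderList.filter (fun m => decide (m ∈ u)) := by
  apply PySem.List.sorted_eq_of_perm_of_pairwise_lt
  · refine (List.perm_ext_iff_of_nodup (List.Nodup.filter _ (by decide)) (List.Nodup.filter _ hu)).mpr ?_
    intro a
    simp only [List.mem_filter, decide_eq_true_eq]
    tauto
  · exact List.Pairwise.sublist List.filter_sublist
      (by decide : pvOrderList.Pairwise
        (fun a b => (PySem.List.index? pvOrderList a).getD 0 < (PySem.List.index? pvOrderList b).getD 0))

-- ===== VERDICT (by name: the statement is the Claim_ definition above) =====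
theorem format_combo_py_spec : Claim_equal_format_combo_py := by
  intro keys _
  unfold Spec_format_combo_py format_combo_py format_combo_py_alt
  have hA := pv_foldA keys []
  have hB := pv_foldB keys []
  simp only [List.filter_nil] at hA
  rw [show (PySem.Set.empty : PySem.Set String) = [] from rfl] at *
  rw [hA, hB]
  have hnd : ((keys.map pvNorm).foldl PySem.Set.add []).Nodup := by
    rw [← PySem.Set.ofList_eq_foldl]
    exact PySem.Set.nodup_ofList _
  simp only [pv_contains_eq]
  rw [pv_mods_sorted _ hnd]
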